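-- pv_equiv track=rewrite | github.com/epicgamer17/modular-rl | offline_data/json_parser.py | _build_trade_tuples
-- ===== SOURCE A (Python) =====
-- def _build_trade_tuples(res: str, n: int, recv: str) -> list[tuple]:
--     """Build one or more MARITIME_TRADE value tuples for a single received resource.
--
--     Standard ratios (2–4) produce one tuple.  n > 4 (e.g. two 3:1 trades batched
--     into one event by colonist.io) is decomposed greedily into valid sub-trades of
--     size 4, 3, or 2 from largest to smallest.
--
--     n=4: [(res, res, res, res, recv)]
--     n=3: [(res, res, res, None, recv)]
--     n=2: [(res, res, None, None, recv)]
--     n=6: [(res×4, recv), (res×2, recv)]  – greedy split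
--     """
--     result: list[tuple] = []
--     remaining = n
--     for size in (4, 3, 2):
--         while remaining >= size:
--             pad = [None] * (4 - size)
--             result.append(tuple([res] * size + pad + [recv]))
--             remaining -= size
--     if remaining > 0:
--         # Leftover 1 card — skip (invalid trade fragment).
--         pass
--     return result
-- ===== SOURCE B (Python) =====
-- def _build_trade_tuples(res: str, n: int, recv: str) -> list[tuple]:
--     if n <= 0:
--         return []
--     q, r = divmod(n, 4)
--     result = [(res, res, res, res, recv)] * q
--     if r == 3:
--         result.append((res, res, res, None, recv))
--     elif r == 2:
--         result.append((res, res, None, None, recv))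
--     return result
-- ===== Notes on version B (the rewrite author's own statement) =====
-- stated objective: simpler
-- what changed: Replaces the greedy subtract-in-a-loop decomposition (nested for/while over sizes 4,3,2) with a closed form: divmod(n,4) gives the count of size-4 tuples built by list repetition, and a single conditional appends the one remainder tuple.
import Mathlib
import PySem

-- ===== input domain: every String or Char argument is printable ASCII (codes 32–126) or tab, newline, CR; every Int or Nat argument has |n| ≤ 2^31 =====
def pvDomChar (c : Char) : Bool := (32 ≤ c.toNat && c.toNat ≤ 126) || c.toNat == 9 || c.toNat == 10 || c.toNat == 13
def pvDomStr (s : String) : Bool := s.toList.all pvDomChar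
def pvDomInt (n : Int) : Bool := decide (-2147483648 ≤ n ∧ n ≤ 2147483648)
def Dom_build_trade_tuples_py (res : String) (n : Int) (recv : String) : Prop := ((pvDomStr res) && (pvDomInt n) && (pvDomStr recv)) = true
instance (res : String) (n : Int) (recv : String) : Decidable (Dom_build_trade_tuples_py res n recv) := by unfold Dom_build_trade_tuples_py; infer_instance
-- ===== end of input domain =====

-- B replaces A's greedy subtract-in-a-loop decomposition by divmod(n,4) + list repetition + one remainder tuple; same return value everywhere.

-- ===== PORT A =====
-- tuple([res]*size + [None]*(4-size) + [recv]) for size ∈ {4,3,2}, as the 5-tuple of Options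
def pvTupA (res recv : String) (size : Int) : Option String × Option String × Option String × Option String × String :=
  if size = 4 then (some res, some res, some res, some res, recv)
  else if size = 3 then (some res, some res, some res, none, recv)
  else (some res, some res, none, none, recv)

theorem pv4pos : (0 : Int) < 4 := by norm_num
theorem pv3pos : (0 : Int) < 3 := by norm_num
theorem pv2pos : (0 : Int) < 2 := by norm_num

-- the inner 'while remaining >= size' loop of A; returns (result, remaining)
def pvLoopA (res recv : String) (size : Int) (hs : 0 < size) (remaining : Int)
    (result : List (Option String × Option String × Option String × Option String × String)) :
    List (Option String × Option String × Option String × Option String × String) × Int :=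
  if h : remaining ≥ size then
    pvLoopA res recv size hs (remaining - size) (result ++ [pvTupA res recv size])
  else (result, remaining)
termination_by remaining.toNat
decreasing_by omega

-- the 'for size in (4, 3, 2)' chain of A's inner loops
def build_trade_tuples_py (res : String) (n : Int) (recv : String) : List (Option String × Option String × Option String × Option String × String) :=
  match pvLoopA res recv 4 pv4pos n [] with
  | (result4, remaining4) =>
    match pvLoopA res recv 3 pv3pos remaining4 result4 with
    | (result3, remaining3) =>
      (pvLoopA res recv 2 pv2pos remaining3 result3).1

-- ===== PORT B =====
def build_trade_tuples_py_alt (res : String) (n : Int) (recv : String) : List (Option String × Option String × Option String × Option String × String) :=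
  if n ≤ 0 then []
  else
    if PySem.Int.mod n 4 = 3 then
      List.replicate (PySem.Int.floordiv n 4).toNat (some res, some res, some res, some res, recv)
        ++ [(some res, some res, some res, none, recv)]
    else if PySem.Int.mod n 4 = 2 then
      List.replicate (PySem.Int.floordiv n 4).toNat (some res, some res, some res, some res, recv)
        ++ [(some res, some res, none, none, recv)]
    else
      List.replicate (PySem.Int.floordiv n 4).toNat (some res, some res, some res, some res, recv)

-- ===== PRECONDITION & SPEC =====
def Spec_build_trade_tuples_py (res : String) (n : Int) (recv : String) (out : List (Option String × Option String × Option String × Option String × String)) : Prop := out = build_trade_tuples_py_alt res n recv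
instance (res : String) (n : Int) (recv : String) (out : List (Option String × Option String × Option String × Option String × String)) : Decidable (Spec_build_trade_tuples_py res n recv out) := by unfold Spec_build_trade_tuples_py; infer_instance

-- ===== CLAIM (what is proved, stated in full; the proofs are below) =====
def Claim_equal_build_trade_tuples_py : Prop := ∀ (res : String) (n : Int) (recv : String), Dom_build_trade_tuples_py res n recv → Spec_build_trade_tuples_py res n recv (build_trade_tuples_py res n recv)

-- ===== LEMMAS AND PROOFS =====

-- the while loop appends remaining/size copies and leaves remaining % size, for remaining ≥ 0
theorem pvLoopA_spec (res recv : String) (size : Int) (hs : 0 < size) :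
    ∀ (k : Nat) (remaining : Int) (result : List (Option String × Option String × Option String × Option String × String)),
      remaining.toNat = k → 0 ≤ remaining →
      pvLoopA res recv size hs remaining result =
        (result ++ List.replicate (remaining.toNat / size.toNat) (pvTupA res recv size),
         ((remaining.toNat % size.toNat : Nat) : Int)) := by
  intro k
  induction k using Nat.strong_induction_on with
  | _ k ih =>
    intro remaining result hk h0
    rw [pvLoopA]
    by_cases h : remaining ≥ size
    · simp only [h, dif_pos]
      rw [ih (remaining - size).toNat (by omega) _ _ rfl (by omega)]
      have hms : size.toNat ≤ remaining.toNat := by omega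
      have hspos : 0 < size.toNat := by omega
      have hdiv : remaining.toNat / size.toNat = (remaining - size).toNat / size.toNat + 1 := by
        rw [Nat.div_eq_sub_div hspos hms]
        congr 2
        omega
      have hmod : remaining.toNat % size.toNat = (remaining - size).toNat % size.toNat := by
        rw [Nat.mod_eq_sub_mod hms]
        congr 2
        omega
      rw [hdiv, hmod]
      simp [List.replicate_succ]
    · simp only [h, dif_neg, not_false_iff]
      have hd : remaining.toNat / size.toNat = 0 := Nat.div_eq_of_lt (by omega)
      have hm : remaining.toNat % size.toNat = remaining.toNat := Nat.mod_eq_of_lt (by omega)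
      rw [hd, hm, List.replicate_zero, List.append_nil]
      congr 1
      omega

theorem pvLoopA_stop (res recv : String) (size : Int) (hs : 0 < size) (remaining : Int)
    (result : List (Option String × Option String × Option String × Option String × String))
    (h : remaining < size) :
    pvLoopA res recv size hs remaining result = (result, remaining) := by
  rw [pvLoopA]; simp [not_le.mpr h]

-- ===== VERDICT (by name: the statement is the Claim_ definition above) =====
theorem build_trade_tuples_py_spec : Claim_equal_build_trade_tuples_py := by
  intro res n recv _
  unfold Spec_build_trade_tuples_py build_trade_tuples_py build_trade_tuples_py_alt
  by_cases hn : n ≤ 0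
  · rw [pvLoopA_stop res recv 4 pv4pos n [] (by omega)]
    dsimp only
    rw [pvLoopA_stop res recv 3 pv3pos n [] (by omega)]
    dsimp only
    rw [pvLoopA_stop res recv 2 pv2pos n [] (by omega)]
    simp [hn]
  · have e4 := pvLoopA_spec res recv 4 pv4pos n.toNat n [] rfl (by omega)
    rw [show (4 : Int).toNat = 4 from rfl, List.nil_append] at e4
    have hq : (PySem.Int.floordiv n 4).toNat = n.toNat / 4 := by
      rw [PySem.Int.floordiv_eq_ediv_of_pos (by norm_num)]; omega
    have hq' : (n / 4).toNat = n.toNat / 4 := by omega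
    have hr : PySem.Int.mod n 4 = ((n.toNat % 4 : Nat) : Int) := by
      rw [PySem.Int.mod_eq_emod_of_pos (by norm_num)]; omega
    have hcases : n.toNat % 4 = 0 ∨ n.toNat % 4 = 1 ∨ n.toNat % 4 = 2 ∨ n.toNat % 4 = 3 := by omega
    rcases hcases with h | h | h | h
    · rw [h] at e4 hr
      push_cast at e4 hr
      rw [e4]
      dsimp only
      have hm : n % 4 = 0 := by omega
      rw [pvLoopA_stop res recv 3 pv3pos 0 _ (by norm_num)]
      dsimp only
      rw [pvLoopA_stop res recv 2 pv2pos 0 _ (by norm_num)]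
      simp [hn, hr, hm, hq, hq', pvTupA]
    · rw [h] at e4 hr
      push_cast at e4 hr
      rw [e4]
      dsimp only
      have hm : n % 4 = 1 := by omega
      rw [pvLoopA_stop res recv 3 pv3pos 1 _ (by norm_num)]
      dsimp only
      rw [pvLoopA_stop res recv 2 pv2pos 1 _ (by norm_num)]
      simp [hn, hr, hm, hq, hq', pvTupA]
    · rw [h] at e4 hr
      push_cast at e4 hr
      rw [e4]
      dsimp only
      have hm : n % 4 = 2 := by omega
      rw [pvLoopA_stop res recv 3 pv3pos 2 _ (by norm_num)]
      dsimp only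
      have e2 := pvLoopA_spec res recv 2 pv2pos 2 2 (List.replicate (n.toNat / 4) (pvTupA res recv 4)) rfl (by norm_num)
      norm_num at e2
      rw [e2]
      simp [hn, hr, hm, hq, hq', pvTupA]
    · rw [h] at e4 hr
      push_cast at e4 hr
      rw [e4]
      dsimp only
      have hm : n % 4 = 3 := by omega
      have e3 := pvLoopA_spec res recv 3 pv3pos 3 3 (List.replicate (n.toNat / 4) (pvTupA res recv 4)) rfl (by norm_num)
      norm_num at e3
      rw [e3]
      dsimp only
      rw [pvLoopA_stop res recv 2 pv2pos 0 _ (by norm_num)]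
      simp [hn, hr, hm, hq, hq', pvTupA]
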